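-- pv_equiv track=rewrite | github.com/Peidong-Wang/Feature-Extraction-for-Speech-Recognition | utils/extract_window.py | num_frames
-- ===== SOURCE A (Python) =====
-- def first_sample_of_frame(frame, opts_dict):
-- 	frame_shift = opts_dict['window_shift']
-- 	if opts_dict['snip_edges']:
-- 		return frame * frame_shift
-- 	else:
-- 		midpoint_of_frame = frame_shift * frame + frame_shift // 2
-- 		beginning_of_frame = midpoint_of_frame - opts_dict['window_size'] // 2
-- 		return beginning_of_frame
--
-- def num_frames(num_samples, opts_dict, flush=True):
-- 	frame_shift = opts_dict['window_shift']
-- 	frame_length = opts_dict['window_size']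
-- 	if opts_dict['snip_edges']:
-- 		if num_samples < frame_length:
-- 			return 0
-- 		else:
-- 			return (1 + ((num_samples - frame_length) // frame_shift))
-- 	else:
-- 		num_frames = (num_samples + (frame_shift // 2)) // frame_shift
-- 		if flush:
-- 			return num_frames
-- 		end_sample_of_last_frame = first_sample_of_frame(num_frames - 1, opts_dict) + frame_length
-- 		while num_frames > 0 and end_sample_of_last_frame > num_samples:
-- 			num_frames -= 1
-- 			end_sample_of_last_frame -= frame_shift
-- 		return num_frames
-- ===== SOURCE B (Python) =====
-- def num_frames(num_samples, opts_dict, flush=True):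
--     frame_shift = opts_dict['window_shift']
--     frame_length = opts_dict['window_size']
--     if opts_dict['snip_edges']:
--         if num_samples < frame_length:
--             return 0
--         return 1 + (num_samples - frame_length) // frame_shift
--     n = (num_samples + frame_shift // 2) // frame_shift
--     if flush:
--         return n
--     # closed form for the trimming loop: largest m with
--     # frame_shift*(m-1) + frame_shift//2 - frame_length//2 + frame_length <= num_samples,
--     # clamped between 0 and n
--     m = (num_samples - frame_shift // 2 + frame_length // 2 - frame_length) // frame_shift + 1
--     return max(0, min(n, m))
-- ===== Notes on version B (the rewrite author's own statement) =====
-- stated objective: simpler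
-- what changed: The snip_edges=False, flush=False trimming loop (decrement num_frames until the last frame ends inside the signal) is replaced by a closed-form solution of the linear threshold, max(0, min(initial, m_max)); the first_sample_of_frame helper disappears.
-- intended difference: When snip_edges is falsy, flush is False and num_samples + frame_shift//2 < 0 (degenerate negative sample count), A returns a negative frame count (the unentered loop's initial value) while B returns 0, the intended number of frames. — e.g. on num_frames(-3, [("window_shift", 2), ("window_size", 2), ("snip_edges", 0)], false): A returns -1, B returns 0
-- outside the precondition, e.g. on num_frames(10, {'window_shift': -2, 'window_size': 4, 'snip_edges': 0}, False): A returns -5, B returns 0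
import Mathlib
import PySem

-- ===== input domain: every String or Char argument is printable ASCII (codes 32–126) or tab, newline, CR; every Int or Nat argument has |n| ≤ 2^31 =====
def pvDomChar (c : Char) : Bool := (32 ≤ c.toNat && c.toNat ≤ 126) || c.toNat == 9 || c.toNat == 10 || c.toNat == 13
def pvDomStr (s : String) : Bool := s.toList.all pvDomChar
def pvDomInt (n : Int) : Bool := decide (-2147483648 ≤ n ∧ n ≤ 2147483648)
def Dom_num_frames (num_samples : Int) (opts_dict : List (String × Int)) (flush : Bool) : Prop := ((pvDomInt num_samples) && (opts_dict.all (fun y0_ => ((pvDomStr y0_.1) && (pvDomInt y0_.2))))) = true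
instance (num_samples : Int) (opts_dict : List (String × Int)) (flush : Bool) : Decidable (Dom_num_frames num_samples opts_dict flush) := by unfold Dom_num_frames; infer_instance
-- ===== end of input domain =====

-- B replaces A's frame-trimming loop by a closed-form clamp; A's negative frame count on
-- degenerate negative num_samples (D_) is returned as 0 by B.


-- ===== PORT A =====
-- dict lookup (first match); Pre_ guarantees the key is present, so the default is never used
def pvGet (opts_dict : List (String × Int)) (k : String) : Int :=
  (opts_dict.lookup k).getD 0

def first_sample_of_frame (frame : Int) (opts_dict : List (String × Int)) : Int :=
  let frame_shift := pvGet opts_dict "window_shift"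
  if pvGet opts_dict "snip_edges" ≠ 0 then
    frame * frame_shift
  else
    let midpoint_of_frame := frame_shift * frame + PySem.Int.floordiv frame_shift 2
    midpoint_of_frame - PySem.Int.floordiv (pvGet opts_dict "window_size") 2

-- the 'while num_frames > 0 and end_sample_of_last_frame > num_samples' loop of A
def numFramesLoop (num_samples frame_shift : Int) (nf e : Int) : Int :=
  if h : nf > 0 ∧ e > num_samples then
    numFramesLoop num_samples frame_shift (nf - 1) (e - frame_shift)
  else nf
termination_by nf.toNat
decreasing_by omega

def num_frames (num_samples : Int) (opts_dict : List (String × Int)) (flush : Bool) : Int :=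
  let frame_shift := pvGet opts_dict "window_shift"
  let frame_length := pvGet opts_dict "window_size"
  if pvGet opts_dict "snip_edges" ≠ 0 then
    if num_samples < frame_length then 0
    else 1 + PySem.Int.floordiv (num_samples - frame_length) frame_shift
  else
    let nf := PySem.Int.floordiv (num_samples + PySem.Int.floordiv frame_shift 2) frame_shift
    if flush then nf
    else
      let e := first_sample_of_frame (nf - 1) opts_dict + frame_length
      numFramesLoop num_samples frame_shift nf e

-- ===== PORT B =====
def num_frames_alt (num_samples : Int) (opts_dict : List (String × Int)) (flush : Bool) : Int :=
  let frame_shift := pvGet opts_dict "window_shift"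
  let frame_length := pvGet opts_dict "window_size"
  if pvGet opts_dict "snip_edges" ≠ 0 then
    if num_samples < frame_length then 0
    else 1 + PySem.Int.floordiv (num_samples - frame_length) frame_shift
  else
    let n := PySem.Int.floordiv (num_samples + PySem.Int.floordiv frame_shift 2) frame_shift
    if flush then n
    else
      let m := PySem.Int.floordiv
        (num_samples - PySem.Int.floordiv frame_shift 2 + PySem.Int.floordiv frame_length 2 - frame_length)
        frame_shift + 1
      max 0 (min n m)

-- ===== PRECONDITION & SPEC =====
-- Pre_ excludes opts_dicts missing any of the three keys (A raises KeyError), those with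
-- window_shift = 0 (A raises ZeroDivisionError), and — only in the trimming branch (snip_edges
-- falsy, flush False) — a negative window_shift: a malformed configuration outside the natural
-- domain, on which the trimming loop's value is an accident of its arithmetic.
def Pre_num_frames (num_samples : Int) (opts_dict : List (String × Int)) (flush : Bool) : Prop :=
  (opts_dict.lookup "window_shift").getD 0 ≠ 0 ∧
  ((opts_dict.lookup "snip_edges").getD 0 = 0 → flush = false →
    0 < (opts_dict.lookup "window_shift").getD 0) ∧
  (opts_dict.lookup "window_shift").isSome ∧
  (opts_dict.lookup "window_size").isSome ∧
  (opts_dict.lookup "snip_edges").isSome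
instance (num_samples : Int) (opts_dict : List (String × Int)) (flush : Bool) : Decidable (Pre_num_frames num_samples opts_dict flush) := by unfold Pre_num_frames; infer_instance

def pvWitness_num_frames : Int × (List (String × Int)) × Bool :=
  (100, [("window_shift", 10), ("window_size", 25), ("snip_edges", 0)], true)

-- When snip_edges is falsy, flush is False and num_samples + window_shift//2 < 0, A returns a
-- negative frame count (the unentered loop's initial value) while B returns 0, the intended count.
def D_num_frames (num_samples : Int) (opts_dict : List (String × Int)) (flush : Bool) : Prop :=
  (opts_dict.lookup "snip_edges").getD 0 = 0 ∧ flush = false ∧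
  num_samples + (opts_dict.lookup "window_shift").getD 0 / 2 < 0
instance (num_samples : Int) (opts_dict : List (String × Int)) (flush : Bool) : Decidable (D_num_frames num_samples opts_dict flush) := by unfold D_num_frames; infer_instance

def Spec_num_frames (num_samples : Int) (opts_dict : List (String × Int)) (flush : Bool) (out : Int) : Prop := ¬ D_num_frames num_samples opts_dict flush → out = num_frames_alt num_samples opts_dict flush
instance (num_samples : Int) (opts_dict : List (String × Int)) (flush : Bool) (out : Int) : Decidable (Spec_num_frames num_samples opts_dict flush out) := by unfold Spec_num_frames; infer_instance

def pvDiffWitness_num_frames : Int × (List (String × Int)) × Bool :=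
  (-3, [("window_shift", 2), ("window_size", 2), ("snip_edges", 0)], false)
def pvDiffWitnessOut_num_frames : Int × Int := (-1, 0)

-- ===== CLAIM (what is proved, stated in full; the proofs are below) =====
def Claim_unchanged_num_frames : Prop := ∀ (num_samples : Int) (opts_dict : List (String × Int)) (flush : Bool), Dom_num_frames num_samples opts_dict flush → Pre_num_frames num_samples opts_dict flush → Spec_num_frames num_samples opts_dict flush (num_frames num_samples opts_dict flush)
def Claim_changed_num_frames : Prop := Dom_num_frames (pvDiffWitness_num_frames.1) (pvDiffWitness_num_frames.2.1) (pvDiffWitness_num_frames.2.2) ∧ Pre_num_frames (pvDiffWitness_num_frames.1) (pvDiffWitness_num_frames.2.1) (pvDiffWitness_num_frames.2.2) ∧ D_num_frames (pvDiffWitness_num_frames.1) (pvDiffWitness_num_frames.2.1) (pvDiffWitness_num_frames.2.2) ∧ num_frames (pvDiffWitness_num_frames.1) (pvDiffWitness_num_frames.2.1) (pvDiffWitness_num_frames.2.2) = pvDiffWitnessOut_num_frames.1 ∧ num_frames_alt (pvDiffWitness_num_frames.1) (pvDiffWitness_num_frames.2.1) (pvDiffWitness_num_frames.2.2) = pvDiffWitnessOut_num_frames.2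 ∧ pvDiffWitnessOut_num_frames.1 ≠ pvDiffWitnessOut_num_frames.2
def Claim_exact_num_frames : Prop := ∀ (num_samples : Int) (opts_dict : List (String × Int)) (flush : Bool), Dom_num_frames num_samples opts_dict flush → Pre_num_frames num_samples opts_dict flush → D_num_frames num_samples opts_dict flush → num_frames num_samples opts_dict flush ≠ num_frames_alt num_samples opts_dict flush

-- ===== LEMMAS AND PROOFS =====

-- the loop computes the clamp of nf to [0, fdiv (ns - C) fs + 1] when e = fs*(nf-1)+C, fs>0, 0 ≤ nf
lemma numFramesLoop_closed (ns fs C : Int) (hfs : 0 < fs) :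
    ∀ (k : Nat) (nf e : Int), nf.toNat = k → 0 ≤ nf → e = fs * (nf - 1) + C →
      numFramesLoop ns fs nf e = max 0 (min nf (PySem.Int.floordiv (ns - C) fs + 1)) := by
  intro k
  induction k with
  | zero =>
    intro nf e hk h0 he
    have hnf : nf = 0 := by omega
    subst hnf
    rw [numFramesLoop]
    simp only [lt_irrefl, false_and, dite_false]
    omega
  | succ k ih =>
    intro nf e hk h0 he
    have hq := PySem.Int.floordiv_eq_iff_of_pos (a := ns - C) (b := fs)
      (q := PySem.Int.floordiv (ns - C) fs) hfs |>.mp rfl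
    set q := PySem.Int.floordiv (ns - C) fs with hqdef
    rw [numFramesLoop]
    by_cases h : nf > 0 ∧ e > ns
    · rw [dif_pos h]
      rw [ih (nf - 1) (e - fs) (by omega) (by omega) (by rw [he]; ring)]
      -- e > ns gives fs*(nf-1) > ns - C ≥ fs*q, so q < nf - 1
      have h1 : fs * q < fs * (nf - 1) := by
        have : q * fs ≤ ns - C := hq.1
        nlinarith [h.2, he]
      have h2 : q < nf - 1 := lt_of_mul_lt_mul_left h1 (le_of_lt hfs)
      omega
    · rw [dif_neg h]
      rcases not_and_or.mp h with h' | h'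
      · -- nf = 0
        have : nf = 0 := by omega
        omega
      · -- e ≤ ns : fs*(nf-1) ≤ ns - C < fs*(q+1), so nf - 1 < q + 1
        have h1 : fs * (nf - 1) < fs * (q + 1) := by
          have : ns - C < (q + 1) * fs := hq.2
          nlinarith [he, not_lt.mp h']
        have h2 : nf - 1 < q + 1 := lt_of_mul_lt_mul_left h1 (le_of_lt hfs)
        omega

-- ===== VERDICT (by name: the statement is the Claim_ definition above) =====
theorem num_frames_spec : Claim_unchanged_num_frames := by
  intro ns opts flush _hdom hpre hnd
  obtain ⟨_, hcond, _, _, _⟩ := hpre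
  unfold num_frames num_frames_alt
  set fs := pvGet opts "window_shift" with hfsdef
  set fl := pvGet opts "window_size" with hfldef
  by_cases hsnip : pvGet opts "snip_edges" ≠ 0
  · simp only [if_pos hsnip]
  · simp only [if_neg hsnip]
    set n := PySem.Int.floordiv (ns + PySem.Int.floordiv fs 2) fs with hndef
    by_cases hfl : flush
    · simp only [if_pos hfl]
    · simp only [if_neg hfl]
      have hfs : 0 < pvGet opts "window_shift" :=
        hcond (not_ne_iff.mp hsnip) (by simpa using hfl)
      have h2 : PySem.Int.floordiv fs 2 = fs / 2 :=
        PySem.Int.floordiv_eq_ediv_of_pos (by norm_num)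
      have hpv : fs = (List.lookup "window_shift" opts).getD 0 := rfl
      have hnum : 0 ≤ ns + PySem.Int.floordiv fs 2 := by
        by_contra hlt
        exact hnd ⟨not_ne_iff.mp hsnip, by simpa using hfl, by omega⟩
      have hn0 : 0 ≤ n := by
        rw [hndef, PySem.Int.floordiv_eq_ediv_of_pos hfs]
        exact Int.ediv_nonneg hnum (le_of_lt hfs)
      have hee : first_sample_of_frame (n - 1) opts + fl =
          fs * (n - 1) + (PySem.Int.floordiv fs 2 - PySem.Int.floordiv fl 2 + fl) := by
        unfold first_sample_of_frame
        simp only [if_neg hsnip, ← hfsdef, ← hfldef]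
        ring
      rw [numFramesLoop_closed ns fs (PySem.Int.floordiv fs 2 - PySem.Int.floordiv fl 2 + fl)
        hfs n.toNat n _ rfl hn0 hee]
      have : ns - (PySem.Int.floordiv fs 2 - PySem.Int.floordiv fl 2 + fl) =
          ns - PySem.Int.floordiv fs 2 + PySem.Int.floordiv fl 2 - fl := by ring
      rw [this]

theorem num_frames_changed : Claim_changed_num_frames := by
  unfold Claim_changed_num_frames
  refine ⟨by decide, by decide, by decide, ?_, by decide, by decide⟩
  show num_frames (-3) [("window_shift", 2), ("window_size", 2), ("snip_edges", 0)] false = -1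
  have hloop : ∀ e : Int, numFramesLoop (-3) 2 (-1) e = -1 := by
    intro e; rw [numFramesLoop, dif_neg (by omega)]
  unfold num_frames
  simp [pvGet, List.lookup, PySem.Int.floordiv, hloop]

theorem num_frames_tight : Claim_exact_num_frames := by
  intro ns opts flush _hdom hpre hd
  obtain ⟨_, hcond, _, _, _⟩ := hpre
  obtain ⟨hsnip', hflush, hneg'⟩ := hd
  have hfs : 0 < pvGet opts "window_shift" := hcond hsnip' hflush
  have hsnip : pvGet opts "snip_edges" = 0 := hsnip'
  have hneg : ns + PySem.Int.floordiv (pvGet opts "window_shift") 2 < 0 := by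
    have h2 : PySem.Int.floordiv (pvGet opts "window_shift") 2 =
        pvGet opts "window_shift" / 2 :=
      PySem.Int.floordiv_eq_ediv_of_pos (by norm_num)
    have hpv : pvGet opts "window_shift" = (List.lookup "window_shift" opts).getD 0 := rfl
    omega
  unfold num_frames num_frames_alt
  simp only [hsnip, hflush, ne_eq, not_true_eq_false, if_false, Bool.false_eq_true]
  set fs := pvGet opts "window_shift" with hfsdef
  set fl := pvGet opts "window_size" with hfldef
  set n := PySem.Int.floordiv (ns + PySem.Int.floordiv fs 2) fs with hndef
  -- n < 0 since the numerator is negative and fs > 0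
  have hn : n < 0 := by
    rw [hndef]
    exact (PySem.Int.floordiv_lt_iff_lt_mul hfs).mpr (by omega)
  -- A's loop never runs (n ≤ 0): it returns n < 0
  have hA : numFramesLoop ns fs n (first_sample_of_frame (n - 1) opts + fl) = n := by
    rw [numFramesLoop]
    rw [dif_neg (by omega)]
  rw [hA]
  -- B returns max 0 (min n m) ≥ 0
  intro hcontra
  have : (0 : Int) ≤ n := by
    rw [hcontra]; exact le_max_left 0 _
  omega
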